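-- pv_equiv track=rewrite | github.com/csmangum/opusagent | opusagent/mock/realtime/client.py | _detect_intents
-- ===== SOURCE A (Python) =====
-- from typing import Any, Callable, Dict, List, Optional, Tuple
--
-- def _detect_intents(user_input: str) -> List[str]:
--     """
--     Detect conversation intents from user input.
--
--     Args:
--         user_input (str): User input text to analyze.
--
--     Returns:
--         List[str]: List of detected intents.
--     """
--     intents = []
--     input_lower = user_input.lower()
--
--     # Greeting intents
--     if any(word in input_lower for word in ["hello", "hi", "hey", "greetings"]):
--         intents.append("greeting")
--
--     # Farewell intents
--     if any(
--         word in input_lower for word in ["goodbye", "bye", "see you", "farewell"]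
--     ):
--         intents.append("farewell")
--
--     # Help intents
--     if any(
--         word in input_lower for word in ["help", "assist", "support", "problem"]
--     ):
--         intents.append("help_request")
--
--     # Question intents
--     if (
--         any(
--             word in input_lower
--             for word in ["what", "how", "why", "when", "where", "who"]
--         )
--         or "?" in user_input
--     ):
--         intents.append("question")
--
--     # Complaint intents
--     if any(
--         word in input_lower
--         for word in ["complaint", "issue", "problem", "wrong", "broken"]
--     ):
--         intents.append("complaint")
--
--     # Thank you intents
--     if any(word in input_lower for word in ["thank", "thanks", "appreciate"]):
--         intents.append("gratitude")
--
--     # Confirmation intents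
--     if any(word in input_lower for word in ["yes", "correct", "right", "confirm"]):
--         intents.append("confirmation")
--
--     # Denial intents
--     if any(word in input_lower for word in ["no", "wrong", "incorrect", "deny"]):
--         intents.append("denial")
--
--     return intents
-- ===== SOURCE B (Python) =====
-- # Single left-to-right scan of the input: at each position, match keywords
-- # starting there (keyword -> intents map), collect hits in a set, then emit
-- # intents in canonical order.
-- _KEYWORD_INTENTS = {
--     "hello": ["greeting"], "hi": ["greeting"], "hey": ["greeting"], "greetings": ["greeting"],
--     "goodbye": ["farewell"], "bye": ["farewell"], "see you": ["farewell"], "farewell": ["farewell"],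
--     "help": ["help_request"], "assist": ["help_request"], "support": ["help_request"],
--     "problem": ["help_request", "complaint"],
--     "what": ["question"], "how": ["question"], "why": ["question"], "when": ["question"],
--     "where": ["question"], "who": ["question"], "?": ["question"],
--     "complaint": ["complaint"], "issue": ["complaint"],
--     "wrong": ["complaint", "denial"], "broken": ["complaint"],
--     "thank": ["gratitude"], "thanks": ["gratitude"], "appreciate": ["gratitude"],
--     "yes": ["confirmation"], "correct": ["confirmation"], "right": ["confirmation"],
--     "confirm": ["confirmation"],
--     "no": ["denial"], "incorrect": ["denial"], "deny": ["denial"],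
-- }
--
-- _INTENT_ORDER = ["greeting", "farewell", "help_request", "question",
--                  "complaint", "gratitude", "confirmation", "denial"]
--
--
-- def _detect_intents(user_input: str):
--     text = user_input.lower()
--     found = set()
--     for i in range(len(text)):
--         for kw, tags in _KEYWORD_INTENTS.items():
--             if text.startswith(kw, i):
--                 found.update(tags)
--     return [t for t in _INTENT_ORDER if t in found]
-- ===== Notes on version B (the rewrite author's own statement) =====
-- stated objective: alternative
-- what changed: Instead of one substring test per keyword per intent, B scans the lowered input once position by position, matching a keyword->intents map at each position into a found-set, and finally emits the intents in a fixed canonical order ('?' folded into the map, which is equivalent since lowercasing fixes '?').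
import Mathlib
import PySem

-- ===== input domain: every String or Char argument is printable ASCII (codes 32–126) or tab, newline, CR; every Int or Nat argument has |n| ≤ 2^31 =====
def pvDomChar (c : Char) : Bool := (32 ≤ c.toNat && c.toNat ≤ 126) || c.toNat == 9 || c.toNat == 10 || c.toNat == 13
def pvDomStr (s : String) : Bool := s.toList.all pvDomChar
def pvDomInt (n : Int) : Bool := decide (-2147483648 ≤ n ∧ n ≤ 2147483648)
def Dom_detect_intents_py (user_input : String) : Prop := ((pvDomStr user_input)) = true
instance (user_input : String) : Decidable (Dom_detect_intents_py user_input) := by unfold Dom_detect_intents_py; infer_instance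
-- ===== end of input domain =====

-- B replaces A's per-intent substring tests by a single position-by-position scan of the lowered input against a keyword→intents map collecting a found-set, emitted in canonical order; same cost, different traversal.


-- ===== PORT A =====
def detect_intents_py (user_input : String) : List String :=
  let intents : List String := []
  let input_lower := PySem.Str.lower user_input
  let intents := if ["hello", "hi", "hey", "greetings"].any (fun word => PySem.Str.isIn word input_lower) then intents ++ ["greeting"] else intents
  let intents := if ["goodbye", "bye", "see you", "farewell"].any (fun word => PySem.Str.isIn word input_lower) then intents ++ ["farewell"] else intents
  let intents := if ["help", "assist", "support", "problem"].any (fun word => PySem.Str.isIn word input_lower) then intents ++ ["help_request"] else intents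
  let intents := if (["what", "how", "why", "when", "where", "who"].any (fun word => PySem.Str.isIn word input_lower) || PySem.Str.isIn "?" user_input) then intents ++ ["question"] else intents
  let intents := if ["complaint", "issue", "problem", "wrong", "broken"].any (fun word => PySem.Str.isIn word input_lower) then intents ++ ["complaint"] else intents
  let intents := if ["thank", "thanks", "appreciate"].any (fun word => PySem.Str.isIn word input_lower) then intents ++ ["gratitude"] else intents
  let intents := if ["yes", "correct", "right", "confirm"].any (fun word => PySem.Str.isIn word input_lower) then intents ++ ["confirmation"] else intents
  let intents := if ["no", "wrong", "incorrect", "deny"].any (fun word => PySem.Str.isIn word input_lower) then intents ++ ["denial"] else intents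
  intents

-- ===== PORT B =====
-- keyword → intents map (dict insertion order) and the canonical output order
def keywordIntents : List (String × List String) :=
  [("hello", ["greeting"]), ("hi", ["greeting"]), ("hey", ["greeting"]), ("greetings", ["greeting"]),
   ("goodbye", ["farewell"]), ("bye", ["farewell"]), ("see you", ["farewell"]), ("farewell", ["farewell"]),
   ("help", ["help_request"]), ("assist", ["help_request"]), ("support", ["help_request"]),
   ("problem", ["help_request", "complaint"]),
   ("what", ["question"]), ("how", ["question"]), ("why", ["question"]), ("when", ["question"]),
   ("where", ["question"]), ("who", ["question"]), ("?", ["question"]),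
   ("complaint", ["complaint"]), ("issue", ["complaint"]),
   ("wrong", ["complaint", "denial"]), ("broken", ["complaint"]),
   ("thank", ["gratitude"]), ("thanks", ["gratitude"]), ("appreciate", ["gratitude"]),
   ("yes", ["confirmation"]), ("correct", ["confirmation"]), ("right", ["confirmation"]),
   ("confirm", ["confirmation"]),
   ("no", ["denial"]), ("incorrect", ["denial"]), ("deny", ["denial"])]

def intentOrder : List String :=
  ["greeting", "farewell", "help_request", "question", "complaint", "gratitude", "confirmation", "denial"]

-- the scan loop: for i in range(len(text)): for kw, tags in map: if text.startswith(kw, i): found.update(tags)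
-- (text.startswith(kw, i) ported by hand as kw.toList.isPrefixOf (chars.drop i); exact for 0 ≤ i < len)
def foundSet (chars : List Char) : PySem.Set String :=
  (List.range chars.length).foldl (fun acc i =>
    keywordIntents.foldl (fun acc2 p =>
      if p.1.toList.isPrefixOf (chars.drop i) then PySem.Set.update acc2 p.2 else acc2) acc)
  PySem.Set.empty

def detect_intents_py_alt (user_input : String) : List String :=
  let text := PySem.Str.lower user_input
  let found := foundSet text.toList
  intentOrder.filter (fun t => PySem.Set.contains found t)

-- ===== PRECONDITION & SPEC =====
def Spec_detect_intents_py (user_input : String) (out : List String) : Prop := out = detect_intents_py_alt user_input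
instance (user_input : String) (out : List String) : Decidable (Spec_detect_intents_py user_input out) := by unfold Spec_detect_intents_py; infer_instance

-- ===== CLAIM (what is proved, stated in full; the proofs are below) =====
def Claim_equal_detect_intents_py : Prop := ∀ (user_input : String), Dom_detect_intents_py user_input → Spec_detect_intents_py user_input (detect_intents_py user_input)

-- ===== LEMMAS AND PROOFS =====
lemma mem_set_update (s : PySem.Set String) (l : List String) (x : String) :
    x ∈ PySem.Set.update s l ↔ x ∈ s ∨ x ∈ l := by
  induction l generalizing s with
  | nil => simp [PySem.Set.update]
  | cons a t ih =>
    have h : PySem.Set.update s (a :: t) = PySem.Set.update (PySem.Set.add s a) t := rfl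
    rw [h, ih, PySem.Set.mem_add]
    simp [List.mem_cons]
    tauto

lemma mem_inner (L : List (String × List String)) (d : List Char) (acc : PySem.Set String) (x : String) :
    x ∈ L.foldl (fun acc2 p => if p.1.toList.isPrefixOf d then PySem.Set.update acc2 p.2 else acc2) acc ↔
      x ∈ acc ∨ ∃ p ∈ L, p.1.toList.isPrefixOf d = true ∧ x ∈ p.2 := by
  induction L generalizing acc with
  | nil => simp
  | cons a t ih =>
    simp only [List.foldl_cons, List.mem_cons]
    by_cases h : a.1.toList.isPrefixOf d = true
    · rw [if_pos h, ih, mem_set_update]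
      constructor
      · rintro ((hx | hx) | ⟨p, hp, hpre, hx⟩)
        · exact Or.inl hx
        · exact Or.inr ⟨a, Or.inl rfl, h, hx⟩
        · exact Or.inr ⟨p, Or.inr hp, hpre, hx⟩
      · rintro (hx | ⟨p, (rfl | hp), hpre, hx⟩)
        · exact Or.inl (Or.inl hx)
        · exact Or.inl (Or.inr hx)
        · exact Or.inr ⟨p, hp, hpre, hx⟩
    · rw [if_neg h, ih]
      constructor
      · rintro (hx | ⟨p, hp, hpre, hx⟩)
        · exact Or.inl hx
        · exact Or.inr ⟨p, Or.inr hp, hpre, hx⟩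
      · rintro (hx | ⟨p, (rfl | hp), hpre, hx⟩)
        · exact Or.inl hx
        · exact absurd hpre h
        · exact Or.inr ⟨p, hp, hpre, hx⟩

lemma hit_iff (kw : List Char) (hne : kw ≠ []) (chars : List Char) :
    (∃ i ∈ List.range chars.length, kw.isPrefixOf (chars.drop i) = true) ↔
      PySem.Chars.isIn kw chars = true := by
  rw [← PySem.Chars.exists_prefix_drop_iff_isIn]
  constructor
  · rintro ⟨i, _, h⟩; exact ⟨i, List.isPrefixOf_iff_prefix.mp h⟩
  · rintro ⟨j, hj⟩
    by_cases hlt : j < chars.length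
    · exact ⟨j, List.mem_range.mpr hlt, List.isPrefixOf_iff_prefix.mpr hj⟩
    · exfalso
      rw [List.drop_eq_nil_of_le (Nat.le_of_not_lt hlt)] at hj
      exact hne (List.prefix_nil.mp hj)

lemma mem_foundSet (chars : List Char) (x : String) :
    x ∈ foundSet chars ↔
      ∃ p ∈ keywordIntents, x ∈ p.2 ∧ PySem.Chars.isIn p.1.toList chars = true := by
  unfold foundSet
  have gen : ∀ (I : List Nat) (acc : PySem.Set String),
      x ∈ I.foldl (fun acc i =>
        keywordIntents.foldl (fun acc2 p =>
          if p.1.toList.isPrefixOf (chars.drop i) then PySem.Set.update acc2 p.2 else acc2) acc) acc ↔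
      x ∈ acc ∨ ∃ i ∈ I, ∃ p ∈ keywordIntents, p.1.toList.isPrefixOf (chars.drop i) = true ∧ x ∈ p.2 := by
    intro I
    induction I with
    | nil => simp
    | cons i t ih =>
      intro acc
      simp only [List.foldl_cons, List.mem_cons]
      rw [ih, mem_inner]
      constructor
      · rintro ((hx | ⟨p, hp, hpre, hx⟩) | ⟨j, hj, p, hp, hpre, hx⟩)
        · exact Or.inl hx
        · exact Or.inr ⟨i, Or.inl rfl, p, hp, hpre, hx⟩
        · exact Or.inr ⟨j, Or.inr hj, p, hp, hpre, hx⟩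
      · rintro (hx | ⟨j, (rfl | hj), p, hp, hpre, hx⟩)
        · exact Or.inl (Or.inl hx)
        · exact Or.inl (Or.inr ⟨p, hp, hpre, hx⟩)
        · exact Or.inr ⟨j, hj, p, hp, hpre, hx⟩
  rw [gen]
  simp only [PySem.Set.empty, List.not_mem_nil, false_or]
  have hne : ∀ p ∈ keywordIntents, p.1.toList ≠ [] := by decide
  constructor
  · rintro ⟨i, hi, p, hp, hpre, hx⟩
    exact ⟨p, hp, hx, (hit_iff p.1.toList (hne p hp) chars).mp ⟨i, hi, hpre⟩⟩
  · rintro ⟨p, hp, hx, hin⟩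
    obtain ⟨i, hi, hpre⟩ := (hit_iff p.1.toList (hne p hp) chars).mpr hin
    exact ⟨i, hi, p, hp, hpre, hx⟩

lemma found_greeting (chars : List Char) :
    PySem.Set.contains (foundSet chars) "greeting" = (PySem.Chars.isIn "hello".toList chars || (PySem.Chars.isIn "hi".toList chars || (PySem.Chars.isIn "hey".toList chars || PySem.Chars.isIn "greetings".toList chars))) := by
  rw [Bool.eq_iff_iff, PySem.Set.contains_iff, mem_foundSet]
  simp only [keywordIntents, List.mem_cons, List.not_mem_nil, or_false, exists_eq_or_imp,
    exists_eq_left, List.mem_singleton, false_and, exists_false, String.reduceEq, and_false,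
    false_or, and_true, or_true, true_and, Bool.or_eq_true]
  try tauto

lemma found_farewell (chars : List Char) :
    PySem.Set.contains (foundSet chars) "farewell" = (PySem.Chars.isIn "goodbye".toList chars || (PySem.Chars.isIn "bye".toList chars || (PySem.Chars.isIn "see you".toList chars || PySem.Chars.isIn "farewell".toList chars))) := by
  rw [Bool.eq_iff_iff, PySem.Set.contains_iff, mem_foundSet]
  simp only [keywordIntents, List.mem_cons, List.not_mem_nil, or_false, exists_eq_or_imp,
    exists_eq_left, List.mem_singleton, false_and, exists_false, String.reduceEq, and_false,
    false_or, and_true, or_true, true_and, Bool.or_eq_true]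
  try tauto

lemma found_help_request (chars : List Char) :
    PySem.Set.contains (foundSet chars) "help_request" = (PySem.Chars.isIn "help".toList chars || (PySem.Chars.isIn "assist".toList chars || (PySem.Chars.isIn "support".toList chars || PySem.Chars.isIn "problem".toList chars))) := by
  rw [Bool.eq_iff_iff, PySem.Set.contains_iff, mem_foundSet]
  simp only [keywordIntents, List.mem_cons, List.not_mem_nil, or_false, exists_eq_or_imp,
    exists_eq_left, List.mem_singleton, false_and, exists_false, String.reduceEq, and_false,
    false_or, and_true, or_true, true_and, Bool.or_eq_true]
  try tauto

lemma found_question (chars : List Char) :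
    PySem.Set.contains (foundSet chars) "question" = (PySem.Chars.isIn "what".toList chars || (PySem.Chars.isIn "how".toList chars || (PySem.Chars.isIn "why".toList chars || (PySem.Chars.isIn "when".toList chars || (PySem.Chars.isIn "where".toList chars || (PySem.Chars.isIn "who".toList chars || PySem.Chars.isIn "?".toList chars)))))) := by
  rw [Bool.eq_iff_iff, PySem.Set.contains_iff, mem_foundSet]
  simp only [keywordIntents, List.mem_cons, List.not_mem_nil, or_false, exists_eq_or_imp,
    exists_eq_left, List.mem_singleton, false_and, exists_false, String.reduceEq, and_false,
    false_or, and_true, or_true, true_and, Bool.or_eq_true]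
  try tauto

lemma found_complaint (chars : List Char) :
    PySem.Set.contains (foundSet chars) "complaint" = (PySem.Chars.isIn "complaint".toList chars || (PySem.Chars.isIn "issue".toList chars || (PySem.Chars.isIn "problem".toList chars || (PySem.Chars.isIn "wrong".toList chars || PySem.Chars.isIn "broken".toList chars)))) := by
  rw [Bool.eq_iff_iff, PySem.Set.contains_iff, mem_foundSet]
  simp only [keywordIntents, List.mem_cons, List.not_mem_nil, or_false, exists_eq_or_imp,
    exists_eq_left, List.mem_singleton, false_and, exists_false, String.reduceEq, and_false,
    false_or, and_true, or_true, true_and, Bool.or_eq_true]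
  try tauto

lemma found_gratitude (chars : List Char) :
    PySem.Set.contains (foundSet chars) "gratitude" = (PySem.Chars.isIn "thank".toList chars || (PySem.Chars.isIn "thanks".toList chars || PySem.Chars.isIn "appreciate".toList chars)) := by
  rw [Bool.eq_iff_iff, PySem.Set.contains_iff, mem_foundSet]
  simp only [keywordIntents, List.mem_cons, List.not_mem_nil, or_false, exists_eq_or_imp,
    exists_eq_left, List.mem_singleton, false_and, exists_false, String.reduceEq, and_false,
    false_or, and_true, or_true, true_and, Bool.or_eq_true]
  try tauto

lemma found_confirmation (chars : List Char) :
    PySem.Set.contains (foundSet chars) "confirmation" = (PySem.Chars.isIn "yes".toList chars || (PySem.Chars.isIn "correct".toList chars || (PySem.Chars.isIn "right".toList chars || PySem.Chars.isIn "confirm".toList chars))) := by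
  rw [Bool.eq_iff_iff, PySem.Set.contains_iff, mem_foundSet]
  simp only [keywordIntents, List.mem_cons, List.not_mem_nil, or_false, exists_eq_or_imp,
    exists_eq_left, List.mem_singleton, false_and, exists_false, String.reduceEq, and_false,
    false_or, and_true, or_true, true_and, Bool.or_eq_true]
  try tauto

lemma found_denial (chars : List Char) :
    PySem.Set.contains (foundSet chars) "denial" = (PySem.Chars.isIn "no".toList chars || (PySem.Chars.isIn "wrong".toList chars || (PySem.Chars.isIn "incorrect".toList chars || PySem.Chars.isIn "deny".toList chars))) := by
  rw [Bool.eq_iff_iff, PySem.Set.contains_iff, mem_foundSet]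
  simp only [keywordIntents, List.mem_cons, List.not_mem_nil, or_false, exists_eq_or_imp,
    exists_eq_left, List.mem_singleton, false_and, exists_false, String.reduceEq, and_false,
    false_or, and_true, or_true, true_and, Bool.or_eq_true]
  try tauto

-- lowercasing a char never yields '?'
lemma lowerChar_ne_q (c : Char) (hu : PySem.Chars.isupper c = true) (h : PySem.Chars.lowerChar c = '?') : False := by
  unfold PySem.Chars.lowerChar at h
  rw [if_pos hu] at h
  unfold PySem.Chars.isupper at hu
  simp [Char.le_def, UInt32.le_iff_toNat_le] at hu
  have hn1 : 65 ≤ c.toNat := hu.1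
  have hn2 : c.toNat ≤ 90 := hu.2
  have hv : Nat.isValidChar (c.toNat + 32) := Or.inl (by omega)
  have h2 : (Char.ofNat (c.toNat + 32)).toNat = '?'.toNat := congrArg Char.toNat h
  rw [Char.toNat_ofNat, if_pos hv] at h2
  have : ('?').toNat = 63 := by decide
  omega

lemma singleton_infix_iff_mem (a : Char) (l : List Char) : [a] <:+: l ↔ a ∈ l := by
  constructor
  · intro h; exact h.subset (List.mem_singleton_self a)
  · intro h
    obtain ⟨s, t, rfl⟩ := List.append_of_mem h
    exact ⟨s, t, by simp⟩

lemma mem_q_lower (l : List Char) : '?' ∈ PySem.Chars.lower l ↔ '?' ∈ l := by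
  unfold PySem.Chars.lower
  simp only [List.mem_map]
  constructor
  · rintro ⟨c, hc, h⟩
    by_cases hu : PySem.Chars.isupper c = true
    · exact absurd h (fun h => lowerChar_ne_q c hu h)
    · have hfix : PySem.Chars.lowerChar c = c := by
        unfold PySem.Chars.lowerChar; rw [if_neg hu]
      rw [hfix] at h; exact h ▸ hc
  · intro h
    exact ⟨'?', h, by decide⟩

-- lowercasing fixes '?': "?" in input_lower ↔ "?" in user_input
lemma isIn_q_lower (l : List Char) :
    PySem.Chars.isIn "?".toList (PySem.Chars.lower l) = PySem.Chars.isIn "?".toList l := by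
  rw [Bool.eq_iff_iff, PySem.Chars.isIn_iff_infix, PySem.Chars.isIn_iff_infix]
  have q : ("?" : String).toList = ['?'] := rfl
  rw [q, singleton_infix_iff_mem, singleton_infix_iff_mem, mem_q_lower]

-- ===== VERDICT (by name: the statement is the Claim_ definition above) =====
theorem detect_intents_py_spec : Claim_equal_detect_intents_py := by
  intro s _
  unfold Spec_detect_intents_py detect_intents_py detect_intents_py_alt intentOrder
  simp only [PySem.Str.isIn_eq, PySem.Str.toList_lower, List.filter_cons, List.filter_nil,
    found_greeting, found_farewell, found_help_request, found_question, found_complaint,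
    found_gratitude, found_confirmation, found_denial, isIn_q_lower,
    List.any_cons, List.any_nil, Bool.or_false, Bool.or_assoc]
  cases _h1 : (PySem.Chars.isIn "hello".toList (PySem.Chars.lower s.toList) || (PySem.Chars.isIn "hi".toList (PySem.Chars.lower s.toList) || (PySem.Chars.isIn "hey".toList (PySem.Chars.lower s.toList) || PySem.Chars.isIn "greetings".toList (PySem.Chars.lower s.toList)))) <;>
    cases _h2 : (PySem.Chars.isIn "goodbye".toList (PySem.Chars.lower s.toList) || (PySem.Chars.isIn "bye".toList (PySem.Chars.lower s.toList) || (PySem.Chars.isIn "see you".toList (PySem.Chars.lower s.toList) || PySem.Chars.isIn "farewell".toList (PySem.Chars.lower s.toList)))) <;>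
    cases _h3 : (PySem.Chars.isIn "help".toList (PySem.Chars.lower s.toList) || (PySem.Chars.isIn "assist".toList (PySem.Chars.lower s.toList) || (PySem.Chars.isIn "support".toList (PySem.Chars.lower s.toList) || PySem.Chars.isIn "problem".toList (PySem.Chars.lower s.toList)))) <;>
    cases _h4 : (PySem.Chars.isIn "what".toList (PySem.Chars.lower s.toList) || (PySem.Chars.isIn "how".toList (PySem.Chars.lower s.toList) || (PySem.Chars.isIn "why".toList (PySem.Chars.lower s.toList) || (PySem.Chars.isIn "when".toList (PySem.Chars.lower s.toList) || (PySem.Chars.isIn "where".toList (PySem.Chars.lower s.toList) || (PySem.Chars.isIn "who".toList (PySem.Chars.lower s.toList) || PySem.Chars.isIn "?".toList s.toList)))))) <;>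
    cases _h5 : (PySem.Chars.isIn "complaint".toList (PySem.Chars.lower s.toList) || (PySem.Chars.isIn "issue".toList (PySem.Chars.lower s.toList) || (PySem.Chars.isIn "problem".toList (PySem.Chars.lower s.toList) || (PySem.Chars.isIn "wrong".toList (PySem.Chars.lower s.toList) || PySem.Chars.isIn "broken".toList (PySem.Chars.lower s.toList))))) <;>
    cases _h6 : (PySem.Chars.isIn "thank".toList (PySem.Chars.lower s.toList) || (PySem.Chars.isIn "thanks".toList (PySem.Chars.lower s.toList) || PySem.Chars.isIn "appreciate".toList (PySem.Chars.lower s.toList))) <;>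
    cases _h7 : (PySem.Chars.isIn "yes".toList (PySem.Chars.lower s.toList) || (PySem.Chars.isIn "correct".toList (PySem.Chars.lower s.toList) || (PySem.Chars.isIn "right".toList (PySem.Chars.lower s.toList) || PySem.Chars.isIn "confirm".toList (PySem.Chars.lower s.toList)))) <;>
    cases _h8 : (PySem.Chars.isIn "no".toList (PySem.Chars.lower s.toList) || (PySem.Chars.isIn "wrong".toList (PySem.Chars.lower s.toList) || (PySem.Chars.isIn "incorrect".toList (PySem.Chars.lower s.toList) || PySem.Chars.isIn "deny".toList (PySem.Chars.lower s.toList)))) <;>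
    rfl
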